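-- pv_equiv track=rewrite | github.com/MenshovSergey/Fitch | brute_force_n.py | tuple_to_dict
-- ===== SOURCE A (Python) =====
-- def tuple_to_dict(tup):
--     k = 0
--     res = dict()
--     for i in list(tup):
--         if i == -1:
--             k += 1
--         else:
--             res[i] = k
--     return res
-- ===== SOURCE B (Python) =====
-- def tuple_to_dict(tup):
--     groups = []
--     cur = []
--     for i in tup:
--         if i == -1:
--             groups.append(cur)
--             cur = []
--         else:
--             cur.append(i)
--     groups.append(cur)
--     res = dict()
--     for gi, g in enumerate(groups):
--         for e in g:
--             res[e] = gi
--     return res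
-- ===== Notes on version B (the rewrite author's own statement) =====
-- stated objective: alternative
-- what changed: B first splits the tuple into -1-delimited segments (empty segments kept), then assigns each element its segment index via enumerate, instead of A's single pass with a running separator counter.
import Mathlib
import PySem

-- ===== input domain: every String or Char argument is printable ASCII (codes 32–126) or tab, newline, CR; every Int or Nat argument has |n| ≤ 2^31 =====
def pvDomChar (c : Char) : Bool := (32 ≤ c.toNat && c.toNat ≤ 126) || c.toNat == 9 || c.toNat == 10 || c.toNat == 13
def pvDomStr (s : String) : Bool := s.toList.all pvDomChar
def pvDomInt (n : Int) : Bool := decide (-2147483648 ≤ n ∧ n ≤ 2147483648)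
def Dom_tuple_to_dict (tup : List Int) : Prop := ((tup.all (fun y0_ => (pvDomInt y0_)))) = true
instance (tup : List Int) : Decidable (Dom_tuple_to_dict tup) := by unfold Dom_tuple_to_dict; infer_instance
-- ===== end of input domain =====

-- B replaces A's single pass with a running separator counter by a two-phase split-into-segments
-- then enumerate-and-assign decomposition (alternative decomposition, same cost; return value only).

-- ===== PORT A =====
def tuple_to_dict (tup : List Int) : List (Int × Int) :=
  (tup.foldl
    (fun (st : Int × PySem.Dict Int Int) i =>
      if i = -1 then (st.1 + 1, st.2) else (st.1, st.2.insert i st.1))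
    (0, PySem.Dict.empty)).2.items

-- ===== PORT B =====
-- phase 1 of Source B: split into -1-delimited segments (groups, cur)
def pvSplit (tup : List Int) : List (List Int) × List Int :=
  tup.foldl
    (fun (st : List (List Int) × List Int) i =>
      if i = -1 then (st.1 ++ [st.2], []) else (st.1, st.2 ++ [i]))
    ([], [])

def tuple_to_dict_alt (tup : List Int) : List (Int × Int) :=
  let st := pvSplit tup
  let groups := st.1 ++ [st.2]
  ((PySem.List.enumerate groups 0).foldl
    (fun (res : PySem.Dict Int Int) gg =>
      gg.2.foldl (fun res e => res.insert e gg.1) res)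
    PySem.Dict.empty).items

-- ===== PRECONDITION & SPEC =====
def Spec_tuple_to_dict (tup : List Int) (out : List (Int × Int)) : Prop := out = tuple_to_dict_alt tup
instance (tup : List Int) (out : List (Int × Int)) : Decidable (Spec_tuple_to_dict tup out) := by unfold Spec_tuple_to_dict; infer_instance

-- ===== CLAIM (what is proved, stated in full; the proofs are below) =====
def Claim_equal_tuple_to_dict : Prop := ∀ (tup : List Int), Dom_tuple_to_dict tup → Spec_tuple_to_dict tup (tuple_to_dict tup)

-- ===== LEMMAS AND PROOFS =====

-- recursive groups-of characterisation (proof-side only)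
def pvGroupsOf : List Int → List (List Int)
  | [] => [[]]
  | i :: xs =>
    if i = -1 then [] :: pvGroupsOf xs
    else
      match pvGroupsOf xs with
      | [] => [[i]]
      | h :: t => (i :: h) :: t

def pvMapHead (g : List Int) : List (List Int) → List (List Int)
  | [] => [g]
  | h :: t => (g ++ h) :: t

def pvAssign : List (List Int) → Int → PySem.Dict Int Int → PySem.Dict Int Int
  | [], _, d => d
  | g :: gs, k, d => pvAssign gs (k + 1) (g.foldl (fun d e => d.insert e k) d)

theorem pvGroupsOf_ne_nil (tup : List Int) : pvGroupsOf tup ≠ [] := by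
  induction tup with
  | nil => simp [pvGroupsOf]
  | cons i xs ih =>
    simp only [pvGroupsOf]
    split_ifs
    · simp
    · cases h : pvGroupsOf xs <;> simp

theorem pvSplit_groups (tup : List Int) :
    ∀ (gs : List (List Int)) (cur : List Int),
      (tup.foldl
        (fun (st : List (List Int) × List Int) i =>
          if i = -1 then (st.1 ++ [st.2], []) else (st.1, st.2 ++ [i]))
        (gs, cur)).1 ++
      [(tup.foldl
        (fun (st : List (List Int) × List Int) i =>
          if i = -1 then (st.1 ++ [st.2], []) else (st.1, st.2 ++ [i]))
        (gs, cur)).2] = gs ++ pvMapHead cur (pvGroupsOf tup) := by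
  induction tup with
  | nil => intro gs cur; simp [pvGroupsOf, pvMapHead]
  | cons i xs ih =>
    intro gs cur
    by_cases hi : i = -1
    · simp only [List.foldl_cons, hi, ih]
      have hne := pvGroupsOf_ne_nil xs
      cases h : pvGroupsOf xs with
      | nil => exact absurd h hne
      | cons hh tt => simp [pvGroupsOf, pvMapHead, h]
    · simp only [List.foldl_cons, if_neg hi, ih]
      have hne := pvGroupsOf_ne_nil xs
      simp only [pvGroupsOf, if_neg hi]
      cases h : pvGroupsOf xs with
      | nil => exact absurd h hne
      | cons hh tt => simp [pvMapHead]

theorem pvA_loop_assign (tup : List Int) :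
    ∀ (k : Int) (d : PySem.Dict Int Int),
      (tup.foldl
        (fun (st : Int × PySem.Dict Int Int) i =>
          if i = -1 then (st.1 + 1, st.2) else (st.1, st.2.insert i st.1))
        (k, d)).2 = pvAssign (pvGroupsOf tup) k d := by
  induction tup with
  | nil => intro k d; simp [pvGroupsOf, pvAssign]
  | cons i xs ih =>
    intro k d
    by_cases hi : i = -1
    · simp only [List.foldl_cons, hi, ih]
      simp [pvGroupsOf, pvAssign]
    · simp only [List.foldl_cons, if_neg hi, ih]
      have hne := pvGroupsOf_ne_nil xs
      simp only [pvGroupsOf, if_neg hi]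
      cases h : pvGroupsOf xs with
      | nil => exact absurd h hne
      | cons hh tt => simp [pvAssign]

theorem pvEnum_assign (gs : List (List Int)) :
    ∀ (k : Int) (d : PySem.Dict Int Int),
      (PySem.List.enumerate gs k).foldl
        (fun (res : PySem.Dict Int Int) gg =>
          gg.2.foldl (fun res e => res.insert e gg.1) res) d
      = pvAssign gs k d := by
  induction gs with
  | nil => intro k d; simp [PySem.List.enumerate_nil, pvAssign]
  | cons g gs ih =>
    intro k d
    rw [PySem.List.enumerate_cons]
    simp only [List.foldl_cons, pvAssign, ih]

-- ===== VERDICT (by name: the statement is the Claim_ definition above) =====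
theorem tuple_to_dict_spec : Claim_equal_tuple_to_dict := by
  intro tup _
  show tuple_to_dict tup = tuple_to_dict_alt tup
  simp only [tuple_to_dict, tuple_to_dict_alt, pvSplit]
  rw [pvEnum_assign, pvSplit_groups, pvA_loop_assign]
  have hne := pvGroupsOf_ne_nil tup
  cases h : pvGroupsOf tup with
  | nil => exact absurd h hne
  | cons hh tt => simp [pvMapHead]
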